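-- pv_equiv track=rewrite | github.com/nicmine15/PL-Verteletski-Oleg | 9 6.2.py | swap_max_diagonal
-- ===== SOURCE A (Python) =====
-- def swap_max_diagonal(m):
--   n = len(m)
--   d1 = [m[i][i] for i in range(n)]
--   d2 = [m[i][n-i-1] for i in range(n)]
--   max_val = max(max(d1), max(d2))
--   i = d1.index(max_val) if max_val in d1 else d2.index(max_val)
--   m[i][i], m[n//2][n//2] = m[n//2][n//2], m[i][i]
--   return m
-- ===== SOURCE B (Python) =====
-- def swap_max_diagonal(m):
--     n = len(m)
--     best_v = m[0][0]
--     best_i = 0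
--     i = 0
--     for row in m:
--         if row[i] > best_v:
--             best_v, best_i = row[i], i
--         i += 1
--     i = 0
--     for row in m:
--         if row[n-i-1] > best_v:
--             best_v, best_i = row[n-i-1], i
--         i += 1
--     m[best_i][best_i], m[n//2][n//2] = m[n//2][n//2], m[best_i][best_i]
--     return m
-- ===== Notes on version B (the rewrite author's own statement) =====
-- stated objective: alternative
-- what changed: Replaced the build-two-diagonal-lists / max / membership-test / list.index pipeline with a single-pass running best (value, index) over the rows, strictly-greater updates reproducing A's first-main-then-anti tie-break; no intermediate lists or rescans.
import Mathlib
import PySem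

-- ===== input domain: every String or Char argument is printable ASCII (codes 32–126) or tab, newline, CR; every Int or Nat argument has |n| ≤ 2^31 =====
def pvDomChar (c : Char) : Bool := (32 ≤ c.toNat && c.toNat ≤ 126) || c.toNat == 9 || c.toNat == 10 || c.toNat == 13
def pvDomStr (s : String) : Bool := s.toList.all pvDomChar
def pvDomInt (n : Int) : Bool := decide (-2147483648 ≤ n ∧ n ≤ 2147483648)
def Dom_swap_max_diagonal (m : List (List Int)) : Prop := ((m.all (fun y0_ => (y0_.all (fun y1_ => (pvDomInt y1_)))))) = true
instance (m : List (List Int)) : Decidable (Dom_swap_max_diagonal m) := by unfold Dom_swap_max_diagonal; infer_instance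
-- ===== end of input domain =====

-- B replaces A's two-diagonal-lists / max / membership-test / list.index pipeline by one
-- running-best (value, index) scan per diagonal (same cost class; both Pythons also mutate
-- the argument in place identically; the theorems here are about the return value).

-- ===== PORT A =====
-- m[r][c] and m[r][c] = v on nonnegative in-range indices (guaranteed by Pre_): getD / set are exact there
def pvGet2 (m : List (List Int)) (r c : Nat) : Int := (m.getD r []).getD c 0
def pvSet2 (m : List (List Int)) (r c : Nat) (v : Int) : List (List Int) :=
  m.set r ((m.getD r []).set c v)

def swap_max_diagonal (m : List (List Int)) : List (List Int) :=
  let n := m.length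
  let d1 := (List.range n).map (fun i => pvGet2 m i i)
  let d2 := (List.range n).map (fun i => pvGet2 m i (n - i - 1))
  let maxVal := max (((PySem.List.max? d1 (fun x => x)).getD 0))
                    (((PySem.List.max? d2 (fun x => x)).getD 0))
  let i : Nat := if maxVal ∈ d1 then (PySem.List.index? d1 maxVal).getD 0
                 else (PySem.List.index? d2 maxVal).getD 0
  let c := n / 2
  let tl := pvGet2 m c c
  let tr := pvGet2 m i i
  let m1 := pvSet2 m i i tl
  pvSet2 m1 c c tr
-- ===== PORT B =====
-- for row in m with counter i: running best (value, index), strict-greater update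
def pvScan1 (l : List (List Int)) (i : Nat) (s : Int × Nat) : Int × Nat :=
  match l with
  | [] => s
  | row :: t => pvScan1 t (i + 1) (if row.getD i 0 > s.1 then (row.getD i 0, i) else s)
def pvScan2 (n : Nat) (l : List (List Int)) (i : Nat) (s : Int × Nat) : Int × Nat :=
  match l with
  | [] => s
  | row :: t => pvScan2 n t (i + 1)
      (if row.getD (n - i - 1) 0 > s.1 then (row.getD (n - i - 1) 0, i) else s)

def swap_max_diagonal_alt (m : List (List Int)) : List (List Int) :=
  let n := m.length
  let s1 := pvScan1 m 0 (pvGet2 m 0 0, 0)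
  let s2 := pvScan2 n m 0 s1
  let bi := s2.2
  let c := n / 2
  let tl := pvGet2 m c c
  let tr := pvGet2 m bi bi
  let m1 := pvSet2 m bi bi tl
  pvSet2 m1 c c tr

-- ===== PRECONDITION & SPEC =====
-- Pre_: exactly the inputs on which the Python A returns: a nonempty matrix whose row i reaches
-- both diagonal columns i and n-i-1 (otherwise Python raises ValueError/IndexError).
def Pre_swap_max_diagonal (m : List (List Int)) : Prop :=
  m ≠ [] ∧ ∀ i : Nat, i < m.length →
    (i < (m.getD i []).length ∧ m.length - i - 1 < (m.getD i []).length)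
instance (m : List (List Int)) : Decidable (Pre_swap_max_diagonal m) := by
  unfold Pre_swap_max_diagonal; infer_instance

def pvWitness_swap_max_diagonal : List (List Int) := [[1, 2, 3], [4, 5, 6], [7, 8, 9]]

def Spec_swap_max_diagonal (m : List (List Int)) (out : List (List Int)) : Prop := out = swap_max_diagonal_alt m
instance (m : List (List Int)) (out : List (List Int)) : Decidable (Spec_swap_max_diagonal m out) := by unfold Spec_swap_max_diagonal; infer_instance

-- ===== CLAIM (what is proved, stated in full; the proofs are below) =====
def Claim_equal_swap_max_diagonal : Prop := ∀ (m : List (List Int)), Dom_swap_max_diagonal m → Pre_swap_max_diagonal m → Spec_swap_max_diagonal m (swap_max_diagonal m)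

-- ===== LEMMAS AND PROOFS =====
-- proof-only view of B's loops: a running-best scan over the list of diagonal values
def pvBestScan (l : List Int) (j : Nat) (s : Int × Nat) : Int × Nat :=
  match l with
  | [] => s
  | v :: t => pvBestScan t (j + 1) (if v > s.1 then (v, j) else s)

lemma zip_d1 (m : List (List Int)) :
    ((m.zipIdx 0).map (fun p => p.1.getD p.2 0))
      = (List.range m.length).map (fun i => pvGet2 m i i) := by
  apply List.ext_getElem
  · simp
  · intro k h1 h2
    simp only [List.length_map, List.length_zipIdx] at h1
    simp [List.getElem_zipIdx, pvGet2, List.getD, List.getElem?_eq_getElem h1]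

lemma pvBestScan_spec (l : List Int) (j : Nat) (b : Int) (i : Nat) :
    pvBestScan l j (b, i) =
      if l.foldl max b ≤ b then (b, i)
      else (l.foldl max b, j + (PySem.List.index? l (l.foldl max b)).getD 0) := by
  induction l generalizing j b i with
  | nil => simp [pvBestScan]
  | cons v t ih =>
    have hle := PySem.List.le_foldl_max t (max b v)
    simp only [pvBestScan, List.foldl_cons]
    by_cases hv : v > b
    · have hbv : max b v = v := by omega
      rw [hbv] at hle ⊢
      rw [if_pos hv, ih]
      have hM : ¬ t.foldl max v ≤ b := by omega
      rw [if_neg hM]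
      by_cases h2 : t.foldl max v ≤ v
      · have hMv : t.foldl max v = v := le_antisymm h2 hle.1
        rw [if_pos h2, hMv, PySem.List.index?_cons_self]
        simp
      · have hne : v ≠ t.foldl max v := by omega
        rw [if_neg h2, PySem.List.index?_cons_of_ne (h := hne)]
        have hmem : t.foldl max v ∈ t := by
          rcases PySem.List.foldl_max_mem t v with h | h
          · omega
          · exact h
        obtain ⟨k, hk⟩ := Option.isSome_iff_exists.1 ((PySem.List.index?_isSome_iff t _).2 hmem)
        rw [hk]
        simp
        omega
    · have hbv : max b v = b := by omega
      rw [hbv] at hle ⊢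
      rw [if_neg hv, ih]
      by_cases h2 : t.foldl max b ≤ b
      · rw [if_pos h2, if_pos h2]
      · have hne : v ≠ t.foldl max b := by omega
        rw [if_neg h2, if_neg h2, PySem.List.index?_cons_of_ne (h := hne)]
        obtain ⟨k, hk⟩ := Option.isSome_iff_exists.1 ((PySem.List.index?_isSome_iff t _).2 (by
          rcases PySem.List.foldl_max_mem t b with h | h
          · omega
          · exact h))
        rw [hk]
        simp
        omega

lemma pvScan1_eq (l : List (List Int)) (j : Nat) (s : Int × Nat) :
    pvScan1 l j s = pvBestScan ((l.zipIdx j).map (fun p => p.1.getD p.2 0)) j s := by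
  induction l generalizing j s with
  | nil => rfl
  | cons row t ih => simp [pvScan1, pvBestScan, ih]

lemma pvScan2_eq (n : Nat) (l : List (List Int)) (j : Nat) (s : Int × Nat) :
    pvScan2 n l j s = pvBestScan ((l.zipIdx j).map (fun p => p.1.getD (n - p.2 - 1) 0)) j s := by
  induction l generalizing j s with
  | nil => rfl
  | cons row t ih => simp [pvScan2, pvBestScan, ih]

lemma zip_d2 (m : List (List Int)) (n : Nat) :
    ((m.zipIdx 0).map (fun p => p.1.getD (n - p.2 - 1) 0))
      = (List.range m.length).map (fun i => pvGet2 m i (n - i - 1)) := by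
  apply List.ext_getElem
  · simp
  · intro k h1 h2
    simp only [List.length_map, List.length_zipIdx] at h1
    simp [List.getElem_zipIdx, pvGet2, List.getD, List.getElem?_eq_getElem h1]

lemma foldl_max_pull (t : List Int) (a b : Int) :
    t.foldl max (max a b) = max a (t.foldl max b) := List.foldl_assoc

lemma pv_idx_eq (m : List (List Int)) (hm : m ≠ []) :
    (if max ((PySem.List.max? ((List.range m.length).map (fun i => pvGet2 m i i)) (fun x => x)).getD 0)
           ((PySem.List.max? ((List.range m.length).map (fun i => pvGet2 m i (m.length - i - 1))) (fun x => x)).getD 0)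
        ∈ (List.range m.length).map (fun i => pvGet2 m i i) then
       (PySem.List.index? ((List.range m.length).map (fun i => pvGet2 m i i))
         (max ((PySem.List.max? ((List.range m.length).map (fun i => pvGet2 m i i)) (fun x => x)).getD 0)
              ((PySem.List.max? ((List.range m.length).map (fun i => pvGet2 m i (m.length - i - 1))) (fun x => x)).getD 0))).getD 0
     else
       (PySem.List.index? ((List.range m.length).map (fun i => pvGet2 m i (m.length - i - 1)))
         (max ((PySem.List.max? ((List.range m.length).map (fun i => pvGet2 m i i)) (fun x => x)).getD 0)
              ((PySem.List.max? ((List.range m.length).map (fun i => pvGet2 m i (m.length - i - 1))) (fun x => x)).getD 0))).getD 0)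
    = (pvScan2 m.length m 0 (pvScan1 m 0 (pvGet2 m 0 0, 0))).2 := by
  have hn : 0 < m.length := List.length_pos_of_ne_nil hm
  obtain ⟨k, hk⟩ : ∃ k, m.length = k + 1 := ⟨m.length - 1, by omega⟩
  set d1 := (List.range m.length).map (fun i => pvGet2 m i i) with hd1
  set d2 := (List.range m.length).map (fun i => pvGet2 m i (m.length - i - 1)) with hd2
  have e1 : d1 = pvGet2 m 0 0 :: (List.range k).map (fun i => pvGet2 m (i + 1) (i + 1)) := by
    rw [hd1, hk, List.range_succ_eq_map]
    simp [Function.comp]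
  have e2 : d2 = pvGet2 m 0 (m.length - 1)
      :: (List.range k).map (fun i => pvGet2 m (i + 1) (m.length - (i + 1) - 1)) := by
    rw [hd2]
    conv_lhs => rw [hk, List.range_succ_eq_map]
    simp [Function.comp]
    exact ⟨by congr 1; omega, fun a ha => by congr 1; omega⟩
  set h1 := pvGet2 m 0 0 with hh1
  set t1 := (List.range k).map (fun i => pvGet2 m (i + 1) (i + 1)) with ht1
  set h2 := pvGet2 m 0 (m.length - 1) with hh2
  set t2 := (List.range k).map (fun i => pvGet2 m (i + 1) (m.length - (i + 1) - 1)) with ht2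
  set M1 := t1.foldl max h1 with hM1
  set M2 := t2.foldl max h2 with hM2
  have hmax1 : (PySem.List.max? d1 (fun x => x)).getD 0 = M1 := by
    rw [e1, PySem.List.max?_id_cons]; rfl
  have hmax2 : (PySem.List.max? d2 (fun x => x)).getD 0 = M2 := by
    rw [e2, PySem.List.max?_id_cons]; rfl
  have hleM1 := PySem.List.le_foldl_max t1 h1
  have hleM2 := PySem.List.le_foldl_max t2 h2
  -- first loop of B ends at the maximum of d1 and its first index
  have hs1 : pvScan1 m 0 (h1, 0) = (M1, (PySem.List.index? d1 M1).getD 0) := by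
    rw [pvScan1_eq, zip_d1, ← hd1, e1]
    simp only [pvBestScan]
    rw [if_neg (by omega), pvBestScan_spec, ← hM1]
    by_cases hc : M1 ≤ h1
    · have hMh : M1 = h1 := le_antisymm hc hleM1.1
      rw [if_pos (by omega), hMh, PySem.List.index?_cons_self]
      rfl
    · have hne : h1 ≠ M1 := by omega
      have hmem : M1 ∈ t1 := by
        rcases PySem.List.foldl_max_mem t1 h1 with h | h
        · omega
        · exact h
      obtain ⟨j, hj⟩ := Option.isSome_iff_exists.1 ((PySem.List.index?_isSome_iff t1 M1).2 hmem)
      rw [if_neg (by omega), PySem.List.index?_cons_of_ne (h := hne), hj]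
      simp [Prod.ext_iff]
      omega
  -- second loop of B
  have hs2 : ∀ i1 : Nat, pvScan2 m.length m 0 (M1, i1)
      = (if max M1 M2 ≤ M1 then (M1, i1)
         else (max M1 M2, (PySem.List.index? d2 (max M1 M2)).getD 0)) := by
    intro i1
    rw [pvScan2_eq, zip_d2, ← hd2, e2]
    simp only [pvBestScan]
    by_cases hh : h2 > M1
    · have hmaxr : max M1 M2 = M2 := max_eq_right (by omega)
      rw [if_pos hh, pvBestScan_spec, ← hM2, hmaxr]
      by_cases hc : M2 ≤ h2
      · have hMh : M2 = h2 := le_antisymm hc hleM2.1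
        rw [if_pos (by omega), if_neg (by omega), hMh, PySem.List.index?_cons_self]
        rfl
      · have hne : h2 ≠ M2 := by omega
        have hmem : M2 ∈ t2 := by
          rcases PySem.List.foldl_max_mem t2 h2 with h | h
          · omega
          · exact h
        obtain ⟨j, hj⟩ := Option.isSome_iff_exists.1 ((PySem.List.index?_isSome_iff t2 M2).2 hmem)
        rw [if_neg (by omega), if_neg (by omega), PySem.List.index?_cons_of_ne (h := hne), hj]
        simp [Prod.ext_iff]
        omega
    · have hfold : t2.foldl max M1 = max M1 M2 := by
        have hMh : max M1 h2 = M1 := by omega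
        rw [hM2, ← foldl_max_pull, hMh]
      rw [if_neg hh, pvBestScan_spec, hfold]
      by_cases hc : max M1 M2 ≤ M1
      · rw [if_pos hc, if_pos hc]
      · have hM2gt : M1 < M2 := by omega
        have hmaxr : max M1 M2 = M2 := max_eq_right (by omega)
        have hne : h2 ≠ max M1 M2 := by omega
        have hmem : max M1 M2 ∈ t2 := by
          rw [hmaxr]
          rcases PySem.List.foldl_max_mem t2 h2 with h | h
          · omega
          · exact h
        obtain ⟨j, hj⟩ := Option.isSome_iff_exists.1 ((PySem.List.index?_isSome_iff t2 _).2 hmem)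
        rw [if_neg hc, if_neg hc, PySem.List.index?_cons_of_ne (h := hne), hj]
        simp [Prod.ext_iff]
        omega
  -- combine
  rw [hmax1, hmax2, hs1, hs2]
  by_cases hc : M2 ≤ M1
  · have hmaxl : max M1 M2 = M1 := max_eq_left hc
    have hmem : M1 ∈ d1 := by
      rw [e1]
      rcases PySem.List.foldl_max_mem t1 h1 with h | h
      · rw [hM1, h]; exact List.mem_cons_self
      · exact List.mem_cons_of_mem _ h
    rw [hmaxl, if_pos hmem, if_pos (le_refl M1)]
  · have hmaxr : max M1 M2 = M2 := max_eq_right (by omega)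
    have hnotmem : max M1 M2 ∉ d1 := by
      rw [e1, hmaxr]
      intro hmem
      rcases List.mem_cons.1 hmem with h | h
      · omega
      · have := hleM1.2 _ h; omega
    rw [if_neg hnotmem, if_neg (by omega)]

lemma pv_ports_eq (m : List (List Int)) (hm : m ≠ []) :
    swap_max_diagonal m = swap_max_diagonal_alt m := by
  unfold swap_max_diagonal swap_max_diagonal_alt
  simp only []
  rw [pv_idx_eq m hm]

-- ===== VERDICT (by name: the statement is the Claim_ definition above) =====
theorem swap_max_diagonal_spec : Claim_equal_swap_max_diagonal := by
  intro m _ hpre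
  unfold Spec_swap_max_diagonal
  exact pv_ports_eq m hpre.1
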